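-- pv_equiv track=rewrite | github.com/VarrSpace/230056-Kripto25 | kripto3/elgamal.py | elgamal_decrypt
-- ===== SOURCE A (Python) =====
-- def mod_pow(base, exp, mod):
--     res = 1
--     while exp > 0:
--         if exp % 2 == 1:
--             res = (res * base) % mod
--         base = (base * base) % mod
--         exp //= 2
--     return res
--
-- def egcd(a, b):
--     if b == 0:
--         return a, 1, 0
--     g, x1, y1 = egcd(b, a % b)
--     return g, y1, x1 - (a // b) * y1
--
-- def mod_inv(a, m):
--     g, x, y = egcd(a, m)
--     if g != 1:
--         raise Exception("No modular inverse")
--     return x % m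
--
-- def elgamal_decrypt(ciphertext, p, x):
--     result = []
--     for a, b in ciphertext:
--         s = mod_pow(a, x, p)
--         inv_s = mod_inv(s, p)
--         m = (b * inv_s) % p
--         result.append(m)
--     return result
-- ===== SOURCE B (Python) =====
-- def mod_pow(base, exp, mod):
--     # recursive square-and-multiply (exp <= 0 gives 1, as in the original)
--     if exp <= 0:
--         return 1
--     half = mod_pow((base * base) % mod, exp // 2, mod)
--     if exp % 2 == 1:
--         return (base * half) % mod
--     return half
--
-- def mod_inv(a, m):
--     # iterative extended Euclid tracking only the a-coefficient
--     old_r, r = a, m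
--     old_s, s = 1, 0
--     while r != 0:
--         q = old_r // r
--         old_r, r = r, old_r - q * r
--         old_s, s = s, old_s - q * s
--     if old_r != 1:
--         raise Exception("No modular inverse")
--     return old_s % m
--
-- def elgamal_decrypt(ciphertext, p, x):
--     return [(b * mod_inv(mod_pow(a, x, p), p)) % p for a, b in ciphertext]
-- ===== Notes on version B (the rewrite author's own statement) =====
-- stated objective: alternative
-- what changed: The recursive egcd + mod_inv pair is replaced by an iterative extended Euclid that tracks only the a-coefficient, and the iterative mod_pow while-loop by recursive square-and-multiply; the per-pair loop becomes a single comprehension.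
import Mathlib
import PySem

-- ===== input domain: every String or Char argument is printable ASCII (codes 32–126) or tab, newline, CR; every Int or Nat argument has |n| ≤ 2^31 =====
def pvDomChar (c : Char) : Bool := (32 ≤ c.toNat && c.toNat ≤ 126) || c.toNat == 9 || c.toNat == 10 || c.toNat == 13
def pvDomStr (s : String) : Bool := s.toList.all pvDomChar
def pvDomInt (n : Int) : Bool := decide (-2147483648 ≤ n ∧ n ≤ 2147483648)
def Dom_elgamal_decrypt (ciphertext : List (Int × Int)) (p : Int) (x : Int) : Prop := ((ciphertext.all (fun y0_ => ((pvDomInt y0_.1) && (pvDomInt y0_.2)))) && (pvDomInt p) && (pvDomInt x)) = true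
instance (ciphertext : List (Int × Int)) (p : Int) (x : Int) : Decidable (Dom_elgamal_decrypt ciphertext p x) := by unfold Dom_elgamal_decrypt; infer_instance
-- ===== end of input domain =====

-- B replaces A's recursive egcd by an iterative extended Euclid tracking only the a-coefficient,
-- and A's iterative mod_pow loop by recursive square-and-multiply (objective: alternative decomposition, same cost).
-- Equivalence is about the RETURN value; neither version mutates its arguments.

-- termination fact both Euclid recursions cite
theorem pvModNatAbsLt (a b : Int) (h : b ≠ 0) : (PySem.Int.mod a b).natAbs < b.natAbs := by
  rcases lt_or_gt_of_ne h with hb | hb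
  · have h1 := PySem.Int.mod_neg_bounds a hb; omega
  · have h1 := PySem.Int.mod_nonneg a hb
    have h2 := PySem.Int.mod_lt a hb
    omega

theorem pvHalfLt (e : Int) (h : 0 < e) : (PySem.Int.floordiv e 2).toNat < e.toNat := by
  rw [PySem.Int.floordiv_eq_ediv_of_pos (by norm_num)]
  omega

-- ===== PORT A =====

-- A's mod_pow: while exp > 0: … (res accumulator)
def pvModPowLoopA (res base exp mod : Int) : Int :=
  if h : 0 < exp then
    pvModPowLoopA
      (if PySem.Int.mod exp 2 = 1 then PySem.Int.mod (res * base) mod else res)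
      (PySem.Int.mod (base * base) mod)
      (PySem.Int.floordiv exp 2) mod
  else res
termination_by exp.toNat
decreasing_by exact pvHalfLt exp h

def pvModPowA (base exp mod : Int) : Int := pvModPowLoopA 1 base exp mod

-- A's recursive egcd
def pvEgcdA (a b : Int) : Int × Int × Int :=
  if h : b = 0 then (a, 1, 0)
  else
    let r := pvEgcdA b (PySem.Int.mod a b)
    (r.1, r.2.2, r.2.1 - PySem.Int.floordiv a b * r.2.2)
termination_by b.natAbs
decreasing_by exact pvModNatAbsLt a b h

-- A's mod_inv; none = Python's raise Exception / ZeroDivisionError on x % 0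
def pvModInvA (a m : Int) : Option Int :=
  let r := pvEgcdA a m
  if r.1 ≠ 1 then none else PySem.Int.mod? r.2.1 m

-- A's per-pair loop; none = some pair raised
def pvDecA (ciphertext : List (Int × Int)) (p : Int) (x : Int) : Option (List Int) :=
  match ciphertext with
  | [] => some []
  | (a, b) :: rest =>
    match pvModInvA (pvModPowA a x p) p with
    | none => none
    | some inv_s =>
      match pvDecA rest p x with
      | none => none
      | some r => some (PySem.Int.mod (b * inv_s) p :: r)

def elgamal_decrypt (ciphertext : List (Int × Int)) (p : Int) (x : Int) : List Int :=
  (pvDecA ciphertext p x).getD []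

-- ===== PORT B =====

-- B's recursive square-and-multiply mod_pow
def pvModPowB (base exp mod : Int) : Int :=
  if h : exp ≤ 0 then 1
  else
    let half := pvModPowB (PySem.Int.mod (base * base) mod) (PySem.Int.floordiv exp 2) mod
    if PySem.Int.mod exp 2 = 1 then PySem.Int.mod (base * half) mod else half
termination_by exp.toNat
decreasing_by exact pvHalfLt exp (by omega)

-- B's iterative extended Euclid loop: while r != 0 (tracks only the a-coefficient)
def pvEgcdLoopB (old_r r old_s s : Int) : Int × Int :=
  if h : r ≠ 0 then
    let q := PySem.Int.floordiv old_r r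
    pvEgcdLoopB r (old_r - q * r) s (old_s - q * s)
  else (old_r, old_s)
termination_by r.natAbs
decreasing_by
  have := pvModNatAbsLt old_r r h
  have heq := PySem.Int.floordiv_mul_add_mod old_r r
  have : old_r - PySem.Int.floordiv old_r r * r = PySem.Int.mod old_r r := by omega
  simp only [this]
  omega

-- B's mod_inv; none = Python's raise / ZeroDivisionError on x % 0
def pvModInvB (a m : Int) : Option Int :=
  let gs := pvEgcdLoopB a m 1 0
  if gs.1 ≠ 1 then none else PySem.Int.mod? gs.2 m

-- B's comprehension
def pvDecB (ciphertext : List (Int × Int)) (p : Int) (x : Int) : Option (List Int) :=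
  match ciphertext with
  | [] => some []
  | (a, b) :: rest =>
    (pvModInvB (pvModPowB a x p) p).bind fun inv =>
      (pvDecB rest p x).map fun r => PySem.Int.mod (b * inv) p :: r

def elgamal_decrypt_alt (ciphertext : List (Int × Int)) (p : Int) (x : Int) : List Int :=
  (pvDecB ciphertext p x).getD []

-- ===== PRECONDITION & SPEC =====
-- Pre_ admits exactly the inputs where the Python returns: on a nonempty ciphertext A raises unless
-- p > 0 (p = 0 gives ZeroDivisionError, p < 0 makes egcd's gcd nonpositive so "No modular inverse"
-- is raised) and each shared secret a^x mod p is invertible, i.e. x ≤ 0 (secret = 1) or gcd(a,p) = 1.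
def Pre_elgamal_decrypt (ciphertext : List (Int × Int)) (p : Int) (x : Int) : Prop :=
  ciphertext = [] ∨ (0 < p ∧ (x ≤ 0 ∨ ∀ ab ∈ ciphertext, Int.gcd ab.1 p = 1))
instance (ciphertext : List (Int × Int)) (p : Int) (x : Int) : Decidable (Pre_elgamal_decrypt ciphertext p x) := by unfold Pre_elgamal_decrypt; infer_instance

def pvWitness_elgamal_decrypt : (List (Int × Int)) × Int × Int := ([(2, 3)], 5, 3)

def Spec_elgamal_decrypt (ciphertext : List (Int × Int)) (p : Int) (x : Int) (out : List Int) : Prop := out = elgamal_decrypt_alt ciphertext p x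
instance (ciphertext : List (Int × Int)) (p : Int) (x : Int) (out : List Int) : Decidable (Spec_elgamal_decrypt ciphertext p x out) := by unfold Spec_elgamal_decrypt; infer_instance

-- ===== CLAIM (what is proved, stated in full; the proofs are below) =====
def Claim_equal_elgamal_decrypt : Prop := ∀ (ciphertext : List (Int × Int)) (p : Int) (x : Int), Dom_elgamal_decrypt ciphertext p x → Pre_elgamal_decrypt ciphertext p x → Spec_elgamal_decrypt ciphertext p x (elgamal_decrypt ciphertext p x)

-- ===== LEMMAS AND PROOFS =====

-- the common value both mod_pows compute
def pvSVal (a x p : Int) : Int := if 0 < x then (a ^ x.toNat) % p else 1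

theorem pvModPowLoopA_eq (p : Int) (hp : 0 < p) :
    ∀ n (e : Int), e.toNat = n → 0 < e → ∀ res b,
      pvModPowLoopA res b e p = (res * b ^ e.toNat) % p := by
  intro n
  induction n using Nat.strong_induction_on with
  | _ n ih =>
    intro e hn he res b
    have h2 : PySem.Int.floordiv e 2 = e / 2 := PySem.Int.floordiv_eq_ediv_of_pos (by norm_num)
    have hm2 : PySem.Int.mod e 2 = e % 2 := PySem.Int.mod_eq_emod_of_pos (by norm_num)
    have hbb : PySem.Int.mod (b * b) p = (b * b) % p := PySem.Int.mod_eq_emod_of_pos hp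
    rw [pvModPowLoopA, dif_pos he, h2, hm2, hbb]
    by_cases h1 : e = 1
    · subst h1
      norm_num
      rw [pvModPowLoopA]
      norm_num
      rw [PySem.Int.mod_eq_emod_of_pos hp]
    · have he2 : 0 < e / 2 := by omega
      have hlt : (e / 2).toNat < n := by omega
      rw [ih _ hlt (e / 2) rfl he2]
      set k := (e / 2).toNat with hk
      have hc0 : (b*b) % p ≡ b*b [ZMOD p] := Int.emod_emod_of_dvd _ dvd_rfl
      have hcong : ((b*b) % p)^k ≡ (b*b)^k [ZMOD p] := hc0.pow k
      by_cases hodd : e % 2 = 1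
      · rw [if_pos hodd]
        have hres : (PySem.Int.mod (res * b) p) ≡ res * b [ZMOD p] := by
          rw [PySem.Int.mod_eq_emod_of_pos hp]; exact Int.emod_emod_of_dvd _ dvd_rfl
        have het : e.toNat = 2 * k + 1 := by omega
        calc (PySem.Int.mod (res * b) p * ((b*b) % p)^k) % p
            = ((res * b) * (b*b)^k) % p := hres.mul hcong
          _ = (res * b ^ e.toNat) % p := by rw [het]; congr 1; ring
      · rw [if_neg hodd]
        have het : e.toNat = 2 * k := by omega
        calc (res * ((b*b) % p)^k) % p
            = (res * (b*b)^k) % p := (Int.ModEq.refl res).mul hcong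
          _ = (res * b ^ e.toNat) % p := by rw [het]; congr 1; ring

theorem pvModPowB_eq (p : Int) (hp : 0 < p) :
    ∀ n (e : Int), e.toNat = n → 0 < e → ∀ b,
      pvModPowB b e p = (b ^ e.toNat) % p := by
  intro n
  induction n using Nat.strong_induction_on with
  | _ n ih =>
    intro e hn he b
    have h2 : PySem.Int.floordiv e 2 = e / 2 := PySem.Int.floordiv_eq_ediv_of_pos (by norm_num)
    have hm2 : PySem.Int.mod e 2 = e % 2 := PySem.Int.mod_eq_emod_of_pos (by norm_num)
    have hbb : PySem.Int.mod (b * b) p = (b * b) % p := PySem.Int.mod_eq_emod_of_pos hp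
    rw [pvModPowB, dif_neg (by omega : ¬ e ≤ 0)]
    simp only [h2, hm2, hbb]
    by_cases h1 : e = 1
    · subst h1
      norm_num
      rw [pvModPowB]
      norm_num
      rw [PySem.Int.mod_eq_emod_of_pos hp]
    · have he2 : 0 < e / 2 := by omega
      have hlt : (e / 2).toNat < n := by omega
      rw [ih _ hlt (e / 2) rfl he2]
      set k := (e / 2).toNat with hk
      have hc0 : (b*b) % p ≡ b*b [ZMOD p] := Int.emod_emod_of_dvd _ dvd_rfl
      have hmm : ∀ y : Int, y % p ≡ y [ZMOD p] := fun y => Int.emod_emod_of_dvd y dvd_rfl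
      have h3 : ((b*b) % p)^k % p ≡ (b*b)^k [ZMOD p] := (hmm _).trans (hc0.pow k)
      by_cases hodd : e % 2 = 1
      · rw [if_pos hodd, PySem.Int.mod_eq_emod_of_pos hp]
        have het : e.toNat = 2 * k + 1 := by omega
        calc (b * (((b*b) % p)^k % p)) % p
            = (b * (b*b)^k) % p := (Int.ModEq.refl b).mul h3
          _ = b ^ e.toNat % p := by rw [het]; congr 1; ring
      · rw [if_neg hodd]
        have het : e.toNat = 2 * k := by omega
        calc ((b*b) % p)^k % p
            = (b*b)^k % p := hc0.pow k
          _ = b ^ e.toNat % p := by rw [het]; congr 1; ring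

theorem pvModPowA_sval (a x p : Int) (hp : 0 < p) : pvModPowA a x p = pvSVal a x p := by
  unfold pvModPowA pvSVal
  by_cases hx : 0 < x
  · rw [if_pos hx, pvModPowLoopA_eq p hp _ x rfl hx, one_mul]
  · rw [if_neg hx, pvModPowLoopA, dif_neg hx]

theorem pvModPowB_sval (a x p : Int) (hp : 0 < p) : pvModPowB a x p = pvSVal a x p := by
  unfold pvSVal
  by_cases hx : 0 < x
  · rw [if_pos hx, pvModPowB_eq p hp _ x rfl hx]
  · rw [if_neg hx, pvModPowB, dif_pos (by omega : x ≤ 0)]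

theorem pvEgcdA_bezout : ∀ n (b : Int), b.natAbs = n → ∀ a,
    (pvEgcdA a b).2.1 * a + (pvEgcdA a b).2.2 * b = (pvEgcdA a b).1 := by
  intro n
  induction n using Nat.strong_induction_on with
  | _ n ih =>
    intro b hn a
    rw [pvEgcdA]
    by_cases hb : b = 0
    · rw [dif_pos hb]; subst hb; simp
    · rw [dif_neg hb]
      have hlt : (PySem.Int.mod a b).natAbs < n := hn ▸ pvModNatAbsLt a b hb
      have hrec := ih _ hlt (PySem.Int.mod a b) rfl b
      have hm : PySem.Int.mod a b = a - PySem.Int.floordiv a b * b := by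
        have := PySem.Int.floordiv_mul_add_mod a b; linarith
      simp only
      linear_combination hrec - (pvEgcdA b (PySem.Int.mod a b)).2.2 * hm

theorem pvEgcdA_gcd : ∀ n (b : Int), b.natAbs = n → ∀ a, 0 ≤ a → 0 ≤ b →
    (pvEgcdA a b).1 = (Int.gcd a b : Int) := by
  intro n
  induction n using Nat.strong_induction_on with
  | _ n ih =>
    intro b hn a ha hb
    rw [pvEgcdA]
    by_cases hb0 : b = 0
    · rw [dif_pos hb0]; subst hb0
      simp [Int.gcd, Int.natAbs_of_nonneg ha]
    · rw [dif_neg hb0]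
      have hbpos : 0 < b := lt_of_le_of_ne hb (Ne.symm hb0)
      have hlt : (PySem.Int.mod a b).natAbs < n := hn ▸ pvModNatAbsLt a b hb0
      rw [ih _ hlt (PySem.Int.mod a b) rfl b hb (PySem.Int.mod_nonneg a hbpos)]
      rw [PySem.Int.mod_eq_emod_of_pos hbpos, Int.gcd_comm b (a % b), Int.gcd_emod a b]

theorem pvEgcdLoopB_gcd : ∀ n (r : Int), r.natAbs = n → ∀ old_r os s, 0 ≤ old_r → 0 ≤ r →
    (pvEgcdLoopB old_r r os s).1 = (Int.gcd old_r r : Int) := by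
  intro n
  induction n using Nat.strong_induction_on with
  | _ n ih =>
    intro r hn old_r os s hor hr
    rw [pvEgcdLoopB]
    by_cases hr0 : r ≠ 0
    · rw [dif_pos hr0]
      have hrpos : 0 < r := lt_of_le_of_ne hr (Ne.symm hr0)
      have hm : old_r - PySem.Int.floordiv old_r r * r = PySem.Int.mod old_r r := by
        have := PySem.Int.floordiv_mul_add_mod old_r r; linarith
      simp only [hm]
      have hlt : (PySem.Int.mod old_r r).natAbs < n := hn ▸ pvModNatAbsLt old_r r hr0
      rw [ih _ hlt (PySem.Int.mod old_r r) rfl r s (os - PySem.Int.floordiv old_r r * s) hr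
        (PySem.Int.mod_nonneg old_r hrpos)]
      rw [PySem.Int.mod_eq_emod_of_pos hrpos, Int.gcd_comm r (old_r % r), Int.gcd_emod old_r r]
    · rw [dif_neg hr0]
      have hr00 : r = 0 := by omega
      subst hr00
      simp [Int.gcd, Int.natAbs_of_nonneg hor]

theorem pvEgcdLoopB_lin (m c : Int) : ∀ n (r : Int), r.natAbs = n → ∀ old_r os s,
    os * c ≡ old_r [ZMOD m] → s * c ≡ r [ZMOD m] →
    (pvEgcdLoopB old_r r os s).2 * c ≡ (pvEgcdLoopB old_r r os s).1 [ZMOD m] := by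
  intro n
  induction n using Nat.strong_induction_on with
  | _ n ih =>
    intro r hn old_r os s hos hs
    rw [pvEgcdLoopB]
    by_cases hr0 : r ≠ 0
    · rw [dif_pos hr0]
      have hlt : (PySem.Int.mod old_r r).natAbs < n := hn ▸ pvModNatAbsLt old_r r hr0
      have hm : old_r - PySem.Int.floordiv old_r r * r = PySem.Int.mod old_r r := by
        have := PySem.Int.floordiv_mul_add_mod old_r r; linarith
      refine ih _ (by rw [← hm] at hlt; exact hlt) _ rfl r s _ hs ?_
      have : (os - PySem.Int.floordiv old_r r * s) * c
           = os * c - PySem.Int.floordiv old_r r * (s * c) := by ring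
      rw [this]
      exact hos.sub (hs.mul_left _)
    · rw [dif_neg hr0]
      exact hos

-- uniqueness of the inverse mod m
theorem pvInvUnique (c m u w : Int) (hg : Int.gcd c m = 1)
    (hu : u * c ≡ 1 [ZMOD m]) (hw : w * c ≡ 1 [ZMOD m]) : u % m = w % m := by
  have hc : IsCoprime c m := Int.isCoprime_iff_gcd_eq_one.mpr hg
  have h1 : u * c ≡ w * c [ZMOD m] := hu.trans hw.symm
  have hd : m ∣ w * c - u * c := Int.ModEq.dvd h1
  have hd2 : m ∣ (w - u) * c := by rw [sub_mul]; exact hd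
  exact Int.modEq_iff_dvd.mpr (hc.symm.dvd_of_dvd_mul_right hd2)

theorem pvSVal_nonneg (a x p : Int) (hp : 0 < p) : 0 ≤ pvSVal a x p := by
  unfold pvSVal
  split_ifs
  · exact Int.emod_nonneg _ (by omega)
  · norm_num

theorem pvSVal_gcd (a x p : Int) (hp : 0 < p) (h : x ≤ 0 ∨ Int.gcd a p = 1) :
    Int.gcd (pvSVal a x p) p = 1 := by
  unfold pvSVal
  split_ifs with hx
  · have hg : Int.gcd a p = 1 := h.resolve_left (by omega)
    rw [Int.gcd_emod]
    exact Int.gcd_pow_left_of_gcd_eq_one hg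
  · simp

-- per-pair: both mod_invs succeed and agree
theorem pvModInv_eq (s p : Int) (hp : 0 < p) (hs : 0 ≤ s) (hg : Int.gcd s p = 1) :
    ∃ i, pvModInvA s p = some i ∧ pvModInvB s p = some i := by
  have hp0 : p ≠ 0 := by omega
  -- A side
  have hA1 : (pvEgcdA s p).1 = 1 := by
    rw [pvEgcdA_gcd _ p rfl s hs hp.le, hg]; rfl
  have hbez := pvEgcdA_bezout _ p rfl s
  rw [hA1] at hbez
  set u := (pvEgcdA s p).2.1 with hu
  have hucong : u * s ≡ 1 [ZMOD p] := by
    apply Int.modEq_iff_dvd.mpr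
    exact ⟨(pvEgcdA s p).2.2, by linarith⟩
  -- B side
  have hB1 : (pvEgcdLoopB s p 1 0).1 = 1 := by
    rw [pvEgcdLoopB_gcd _ p rfl s 1 0 hs hp.le, hg]; rfl
  set w := (pvEgcdLoopB s p 1 0).2 with hw
  have hwcong : w * s ≡ 1 [ZMOD p] := by
    have := pvEgcdLoopB_lin p s _ p rfl s 1 0 (by simpa using Int.ModEq.refl s)
      (by simpa using (Int.modEq_iff_dvd.mpr ⟨1, by ring⟩ : (0 : Int) ≡ p [ZMOD p]))
    rw [hB1] at this
    exact this
  -- the two inverses agree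
  have heq : u % p = w % p := pvInvUnique s p u w hg hucong hwcong
  refine ⟨PySem.Int.mod u p, ?_, ?_⟩
  · unfold pvModInvA
    simp only [← hu, hA1]
    norm_num
    simp [PySem.Int.mod?, PySem.Int.mod, hp0]
  · unfold pvModInvB
    simp only [← hw, hB1]
    norm_num
    have hfm : ∀ y : Int, PySem.Int.mod y p = y % p := fun y => PySem.Int.mod_eq_emod_of_pos hp
    simp only [PySem.Int.mod?, PySem.Int.mod, hp0] at hfm ⊢
    norm_num
    rw [hfm, hfm, heq]

theorem pvDec_eq (ciphertext : List (Int × Int)) (p x : Int) (hp : 0 < p)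
    (h : x ≤ 0 ∨ ∀ ab ∈ ciphertext, Int.gcd ab.1 p = 1) :
    pvDecA ciphertext p x = pvDecB ciphertext p x := by
  induction ciphertext with
  | nil => rfl
  | cons ab rest ihr =>
    obtain ⟨a, b⟩ := ab
    have hhead : x ≤ 0 ∨ Int.gcd a p = 1 := by
      rcases h with h | h
      · exact Or.inl h
      · exact Or.inr (h (a, b) (List.mem_cons_self))
    have htail : x ≤ 0 ∨ ∀ ab ∈ rest, Int.gcd ab.1 p = 1 := by
      rcases h with h | h
      · exact Or.inl h
      · exact Or.inr fun ab hab => h ab (List.mem_cons_of_mem _ hab)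
    obtain ⟨i, hA, hB⟩ := pvModInv_eq (pvSVal a x p) p hp (pvSVal_nonneg a x p hp)
      (pvSVal_gcd a x p hp hhead)
    rw [pvDecA, pvDecB, pvModPowA_sval a x p hp, pvModPowB_sval a x p hp, hA, hB, ihr htail]
    cases pvDecB rest p x <;> rfl

-- ===== VERDICT (by name: the statement is the Claim_ definition above) =====
theorem elgamal_decrypt_spec : Claim_equal_elgamal_decrypt := by
  intro ct p x _ hpre
  unfold Spec_elgamal_decrypt elgamal_decrypt elgamal_decrypt_alt
  rcases hpre with h | ⟨hp, h⟩
  · subst h; rfl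
  · rw [pvDec_eq ct p x hp h]
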